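-- pv_equiv track=rewrite | github.com/rdiezlla/market_basket | src/market_basket/mahou_beneficio_layout_actual_2026_v2.py | _count_aisle_changes
-- ===== SOURCE A (Python) =====
-- def _count_aisle_changes(aisle_sequence: list[int]) -> int:
--     if not aisle_sequence:
--         return 0
--     changes = 0
--     previous = aisle_sequence[0]
--     for current in aisle_sequence[1:]:
--         if current != previous:
--             changes += 1
--         previous = current
--     return changes
-- ===== SOURCE B (Python) =====
-- def _count_aisle_changes(aisle_sequence: list[int]) -> int:
--     # Divide and conquer: changes in a list = changes in the left half
--     # + changes in the right half + 1 if the aisle changes at the split point.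
--     def rec(s: list[int]) -> int:
--         if len(s) < 2:
--             return 0
--         m = len(s) // 2
--         return rec(s[:m]) + rec(s[m:]) + (1 if s[m - 1] != s[m] else 0)
--
--     return rec(aisle_sequence)
-- ===== Notes on version B (the rewrite author's own statement) =====
-- stated objective: alternative
-- what changed: Replaces the linear previous/changes accumulator scan with a divide-and-conquer recursion: split the list in half, count changes in each half independently, and add one if the aisle differs across the split boundary.
import Mathlib
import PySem

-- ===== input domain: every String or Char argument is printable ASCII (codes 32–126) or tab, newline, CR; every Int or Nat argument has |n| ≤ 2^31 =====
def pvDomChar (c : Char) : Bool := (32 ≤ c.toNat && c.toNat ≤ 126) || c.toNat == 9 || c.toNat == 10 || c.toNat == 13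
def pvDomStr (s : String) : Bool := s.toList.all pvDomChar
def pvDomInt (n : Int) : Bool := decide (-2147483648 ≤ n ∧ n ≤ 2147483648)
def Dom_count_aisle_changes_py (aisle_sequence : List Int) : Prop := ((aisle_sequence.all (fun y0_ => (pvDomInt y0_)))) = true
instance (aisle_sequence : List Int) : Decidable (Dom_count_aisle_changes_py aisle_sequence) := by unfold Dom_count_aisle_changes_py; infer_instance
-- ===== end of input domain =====

-- B replaces A's linear previous/changes accumulator scan with a divide-and-conquer
-- recursion (split in half, recurse, add the split-boundary change); objective: alternative.


-- ===== PORT A =====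
-- A: explicit loop keeping `previous` and a `changes` counter.
def count_aisle_changes_py (aisle_sequence : List Int) : Int :=
  match aisle_sequence with
  | [] => 0
  | x :: _ =>
    (aisle_sequence.drop 1).foldl
      (fun (s : Int × Int) current =>
        (if current ≠ s.2 then s.1 + 1 else s.1, current)) (0, x) |>.1

-- ===== PORT B =====
-- B: divide and conquer — changes(s) = changes(left half) + changes(right half)
-- + 1 if the aisle differs at the split boundary; lists of length < 2 have 0 changes.
-- s[m-1] and s[m] are in range in Python (2 ≤ len s, 1 ≤ m < len s), ported as getD.
def pvAltRec (s : List Int) : Int :=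
  if s.length < 2 then 0
  else
    pvAltRec (s.take (s.length / 2)) + pvAltRec (s.drop (s.length / 2)) +
      (if s.getD (s.length / 2 - 1) 0 ≠ s.getD (s.length / 2) 0 then 1 else 0)
termination_by s.length
decreasing_by
  · simp only [List.length_take]; omega
  · simp only [List.length_drop]; omega

def count_aisle_changes_py_alt (aisle_sequence : List Int) : Int :=
  pvAltRec aisle_sequence

-- ===== PRECONDITION & SPEC =====
def Spec_count_aisle_changes_py (aisle_sequence : List Int) (out : Int) : Prop := out = count_aisle_changes_py_alt aisle_sequence
instance (aisle_sequence : List Int) (out : Int) : Decidable (Spec_count_aisle_changes_py aisle_sequence out) := by unfold Spec_count_aisle_changes_py; infer_instance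

-- ===== CLAIM (what is proved, stated in full; the proofs are below) =====
def Claim_equal_count_aisle_changes_py : Prop := ∀ (aisle_sequence : List Int), Dom_count_aisle_changes_py aisle_sequence → Spec_count_aisle_changes_py aisle_sequence (count_aisle_changes_py aisle_sequence)

-- ===== LEMMAS AND PROOFS =====

-- reference count of adjacent unequal pairs
def pvChg : List Int → Int
  | a :: b :: t => (if b ≠ a then 1 else 0) + pvChg (b :: t)
  | _ => 0

theorem pvChg_short (s : List Int) (h : s.length < 2) : pvChg s = 0 := by
  match s, h with
  | [], _ => rfl
  | [_], _ => rfl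

theorem foldl_eq_pvChg (t : List Int) (p c : Int) :
    ((t.foldl (fun (s : Int × Int) current =>
        (if current ≠ s.2 then s.1 + 1 else s.1, current)) (c, p)).1)
      = c + pvChg (p :: t) := by
  induction t generalizing p c with
  | nil => simp [pvChg]
  | cons y t ih =>
    rw [List.foldl_cons]
    show ((t.foldl _ ((if y ≠ p then c + 1 else c), y)).1) = _
    rw [ih y _, pvChg]
    split_ifs <;> ring

theorem pvChg_append (s t : List Int) (hs : s ≠ []) (ht : t ≠ []) :
    pvChg (s ++ t) = pvChg s + pvChg t +
      (if s.getLast? ≠ t.head? then 1 else 0) := by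
  induction s with
  | nil => exact absurd rfl hs
  | cons a s ih =>
    cases s with
    | nil =>
      cases t with
      | nil => exact absurd rfl ht
      | cons b t =>
        simp only [List.cons_append, List.nil_append, pvChg, List.getLast?_singleton,
          List.head?_cons, ne_eq, Option.some.injEq]
        generalize pvChg (b :: t) = X
        split_ifs <;> omega
    | cons a' s' =>
      have := ih (by simp) 
      simp only [List.cons_append, pvChg] at *
      rw [this]
      have hlast : (a :: a' :: s').getLast? = (a' :: s').getLast? := by
        simp [List.getLast?_cons_cons]
      rw [hlast]
      ring

theorem pvAltRec_eq_pvChg (s : List Int) : pvAltRec s = pvChg s := by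
  induction s using pvAltRec.induct with
  | case1 s h => rw [pvAltRec, if_pos h, pvChg_short s h]
  | case2 s h ih1 ih2 =>
    rw [pvAltRec, if_neg h]
    set m := s.length / 2 with hm
    have hlen : 2 ≤ s.length := by omega
    have hm1 : 1 ≤ m := by omega
    have hmlt : m < s.length := by omega
    have htake : s.take m ≠ [] :=
      List.ne_nil_of_length_pos (by simp only [List.length_take]; omega)
    have hdrop : s.drop m ≠ [] :=
      List.ne_nil_of_length_pos (by simp only [List.length_drop]; omega)
    have key := pvChg_append (s.take m) (s.drop m) htake hdrop
    rw [List.take_append_drop] at key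
    rw [key, ih1, ih2]
    have hget1 : (s.take m).getLast? = s[m - 1]? := by
      rw [List.getLast?_eq_getElem?]
      rw [List.getElem?_take_of_lt (by simp [List.length_take]; omega)]
      congr 1
      simp [List.length_take]
      omega
    have hget2 : (s.drop m).head? = s[m]? := List.head?_drop
    have he1 : s[m - 1]? = some (s.getD (m - 1) 0) := by
      rw [List.getD_eq_getElem _ _ (by omega), List.getElem?_eq_getElem (by omega)]
    have he2 : s[m]? = some (s.getD m 0) := by
      rw [List.getD_eq_getElem _ _ (by omega), List.getElem?_eq_getElem (by omega)]
    rw [hget1, hget2, he1, he2]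
    simp only [ne_eq, Option.some.injEq]

-- ===== VERDICT (by name: the statement is the Claim_ definition above) =====
theorem count_aisle_changes_py_spec : Claim_equal_count_aisle_changes_py := by
  intro l _
  unfold Spec_count_aisle_changes_py count_aisle_changes_py count_aisle_changes_py_alt
  rw [pvAltRec_eq_pvChg]
  cases l with
  | nil => rfl
  | cons x t =>
    simp only [List.drop_one, List.tail_cons]
    rw [foldl_eq_pvChg t x 0, zero_add]
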